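-- pv_equiv track=rewrite | github.com/smohapatra1/scripting | python/practice/start_again/2024/04182024/xor_sequence.py | xorSequence
-- ===== SOURCE A (Python) =====
-- def xorSequence(l, r):
--     A = 0
--     B = 0
--     for i in range(1, r+1):
--         B ^=i
--         if i >= l:
--             A = A ^ B
--     return A
-- ===== SOURCE B (Python) =====
-- def xorSequence(l, r):
--     # Closed form: answer = F(r) ^ F(lo-1), where F(n) = XOR of prefix-xors 1..n,
--     # computed O(1) from n % 8.
--     def F(n):
--         m = n % 8
--         if m <= 1:
--             return n
--         if m <= 3:
--             return 2
--         if m <= 5: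
--             return n + 2
--         return 0
--     lo = l if l > 1 else 1
--     if r < lo:
--         return 0
--     return F(r) ^ F(lo - 1)
-- ===== Notes on version B (the rewrite author's own statement) =====
-- stated objective: faster
-- what changed: Replaced the O(r) loop accumulating prefix XORs with an O(1) closed form using the period-8 pattern of the XOR of prefix-XOR values.
import Mathlib
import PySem

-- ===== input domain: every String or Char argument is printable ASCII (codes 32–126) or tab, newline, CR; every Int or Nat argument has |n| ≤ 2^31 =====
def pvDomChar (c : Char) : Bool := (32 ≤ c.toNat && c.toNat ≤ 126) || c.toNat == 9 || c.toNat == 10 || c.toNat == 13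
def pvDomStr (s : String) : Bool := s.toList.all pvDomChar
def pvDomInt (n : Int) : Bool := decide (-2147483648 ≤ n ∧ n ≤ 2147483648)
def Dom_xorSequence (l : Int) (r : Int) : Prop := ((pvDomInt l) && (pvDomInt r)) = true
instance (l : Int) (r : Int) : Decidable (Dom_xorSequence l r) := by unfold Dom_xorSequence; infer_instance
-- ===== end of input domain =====

-- B replaces A's O(r) accumulation loop with an O(1) period-8 closed form for the
-- XOR of prefix-XOR values; return values agree on all inputs.

-- ===== PORT A =====
def xorSequence (l : Int) (r : Int) : Int :=
  ((PySem.List.pyRange 1 (r + 1) 1).foldl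
    (fun (st : Int × Int) i =>
      let B := PySem.Int.bxor st.2 i
      (if i ≥ l then PySem.Int.bxor st.1 B else st.1, B)) (0, 0)).1

-- ===== PORT B =====
-- helper F: XOR of prefix-xors 1..n, closed form from n % 8
def pvF (n : Int) : Int :=
  let m := PySem.Int.mod n 8
  if m ≤ 1 then n
  else if m ≤ 3 then 2
  else if m ≤ 5 then n + 2
  else 0

def xorSequence_alt (l : Int) (r : Int) : Int :=
  let lo := if l > 1 then l else 1
  if r < lo then 0
  else PySem.Int.bxor (pvF r) (pvF (lo - 1))

-- ===== PRECONDITION & SPEC =====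
def Spec_xorSequence (l : Int) (r : Int) (out : Int) : Prop := out = xorSequence_alt l r
instance (l : Int) (r : Int) (out : Int) : Decidable (Spec_xorSequence l r out) := by unfold Spec_xorSequence; infer_instance

-- ===== CLAIM (what is proved, stated in full; the proofs are below) =====
def Claim_equal_xorSequence : Prop := ∀ (l : Int) (r : Int), Dom_xorSequence l r → Spec_xorSequence l r (xorSequence l r)

-- ===== LEMMAS AND PROOFS =====

-- running prefix xor B after i iterations
def gN : Nat → Nat
  | 0 => 0
  | n + 1 => gN n ^^^ (n + 1)

-- A's accumulator after i iterations
def aN (l : Int) : Nat → Nat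
  | 0 => 0
  | n + 1 => if ((n : Int) + 1) ≥ l then aN l n ^^^ gN (n + 1) else aN l n

-- xor of all prefix xors 1..n
def fN : Nat → Nat
  | 0 => 0
  | n + 1 => fN n ^^^ gN (n + 1)

lemma xor_even_even (a b : Nat) : (2 * a) ^^^ (2 * b) = 2 * (a ^^^ b) := by
  have h := Nat.xor_bit false a false b
  simpa [Nat.bit] using h

lemma xor_odd_odd (a b : Nat) : (2 * a + 1) ^^^ (2 * b + 1) = 2 * (a ^^^ b) := by
  have h := Nat.xor_bit true a true b
  simpa [Nat.bit] using h

lemma xor_odd_even (a b : Nat) : (2 * a + 1) ^^^ (2 * b) = 2 * (a ^^^ b) + 1 := by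
  have h := Nat.xor_bit true a false b
  simpa [Nat.bit] using h

lemma xor_even_one (n : Nat) (h : n % 2 = 0) : n ^^^ 1 = n + 1 :=
  Nat.xor_one_of_even (Nat.even_iff.mpr h)

def gC (n : Nat) : Nat :=
  if n % 4 = 0 then n else if n % 4 = 1 then 1 else if n % 4 = 2 then n + 1 else 0

lemma gN_eq (n : Nat) : gN n = gC n := by
  induction n with
  | zero => simp [gN, gC]
  | succ n ih =>
    have hstep : gN (n + 1) = gC n ^^^ (n + 1) := by
      rw [show gN (n + 1) = gN n ^^^ (n + 1) from rfl, ih]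
    have h4 : n % 4 = 0 ∨ n % 4 = 1 ∨ n % 4 = 2 ∨ n % 4 = 3 := by omega
    rcases h4 with h | h | h | h
    · rw [hstep, show gC n = n by simp [gC, h],
        show gC (n + 1) = 1 by simp [gC, show (n + 1) % 4 = 1 by omega],
        ← xor_even_one n (by omega), Nat.xor_xor_cancel_left]
    · rw [hstep, show gC n = 1 by simp [gC, h],
        show gC (n + 1) = n + 1 + 1 by simp [gC, show (n + 1) % 4 = 2 by omega],
        Nat.xor_comm, xor_even_one (n + 1) (by omega)]
    · rw [hstep, show gC n = n + 1 by simp [gC, h],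
        show gC (n + 1) = 0 by simp [gC, show (n + 1) % 4 = 3 by omega], Nat.xor_self]
    · rw [hstep, show gC n = 0 by simp [gC, h],
        show gC (n + 1) = n + 1 by simp [gC, show (n + 1) % 4 = 0 by omega],
        Nat.zero_xor]

def fC (n : Nat) : Nat :=
  if n % 8 ≤ 1 then n else if n % 8 ≤ 3 then 2 else if n % 8 ≤ 5 then n + 2 else 0

lemma key1 (m : Nat) : (8 * m + 1) ^^^ (8 * m + 3) = 2 := by
  calc (8 * m + 1) ^^^ (8 * m + 3) = (2 * (4 * m) + 1) ^^^ (2 * (4 * m + 1) + 1) := by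
        congr 1 <;> ring
    _ = 2 * ((4 * m) ^^^ (4 * m + 1)) := xor_odd_odd (4 * m) (4 * m + 1)
    _ = 2 := by
        rw [show 4 * m + 1 = (4 * m) ^^^ 1 from (xor_even_one (4 * m) (by omega)).symm,
          Nat.xor_xor_cancel_left]

lemma key3 (m : Nat) : (2 : Nat) ^^^ (8 * m + 4) = 8 * m + 6 := by
  calc (2 : Nat) ^^^ (8 * m + 4) = (2 * 1) ^^^ (2 * (4 * m + 2)) := by congr 1 <;> ring
    _ = 2 * (1 ^^^ (4 * m + 2)) := xor_even_even 1 (4 * m + 2)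
    _ = 2 * ((2 * 0 + 1) ^^^ (2 * (2 * m + 1))) := by congr 2 <;> ring
    _ = 2 * (2 * (0 ^^^ (2 * m + 1)) + 1) := by rw [xor_odd_even]
    _ = 8 * m + 6 := by rw [Nat.zero_xor]; ring

lemma fN_eq (n : Nat) : fN n = fC n := by
  induction n with
  | zero => simp [fN, fC]
  | succ n ih =>
    have hs : fN (n + 1) = fC n ^^^ gC (n + 1) := by
      rw [show fN (n + 1) = fN n ^^^ gN (n + 1) from rfl, ih, gN_eq]
    have h8 : n % 8 = 0 ∨ n % 8 = 1 ∨ n % 8 = 2 ∨ n % 8 = 3 ∨ n % 8 = 4 ∨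
        n % 8 = 5 ∨ n % 8 = 6 ∨ n % 8 = 7 := by omega
    rcases h8 with h | h | h | h | h | h | h | h
    · rw [hs, show fC n = n by simp [fC, h],
        show gC (n + 1) = 1 by simp [gC, show (n + 1) % 4 = 1 by omega],
        show fC (n + 1) = n + 1 by simp [fC, show (n + 1) % 8 = 1 by omega],
        xor_even_one n (by omega)]
    · obtain ⟨m, rfl⟩ : ∃ m, n = 8 * m + 1 := ⟨n / 8, by omega⟩
      rw [hs, show fC (8 * m + 1) = 8 * m + 1 by simp [fC, show (8 * m + 1) % 8 = 1 by omega],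
        show gC (8 * m + 1 + 1) = 8 * m + 3 by
          simp [gC, show (8 * m + 1 + 1) % 4 = 2 by omega],
        show fC (8 * m + 1 + 1) = 2 by
          simp [fC, show (8 * m + 1 + 1) % 8 = 2 by omega],
        key1]
    · rw [hs, show fC n = 2 by simp [fC, h],
        show gC (n + 1) = 0 by simp [gC, show (n + 1) % 4 = 3 by omega],
        show fC (n + 1) = 2 by simp [fC, show (n + 1) % 8 = 3 by omega], Nat.xor_zero]
    · obtain ⟨m, rfl⟩ : ∃ m, n = 8 * m + 3 := ⟨n / 8, by omega⟩
      rw [hs, show fC (8 * m + 3) = 2 by simp [fC, show (8 * m + 3) % 8 = 3 by omega],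
        show gC (8 * m + 3 + 1) = 8 * m + 4 by
          simp [gC, show (8 * m + 3 + 1) % 4 = 0 by omega],
        show fC (8 * m + 3 + 1) = 8 * m + 6 by
          simp [fC, show (8 * m + 3 + 1) % 8 = 4 by omega],
        key3]
    · rw [hs, show fC n = n + 2 by simp [fC, h, show ¬ n % 8 ≤ 3 by omega],
        show gC (n + 1) = 1 by simp [gC, show (n + 1) % 4 = 1 by omega],
        show fC (n + 1) = n + 1 + 2 by
          simp [fC, show (n + 1) % 8 = 5 by omega],
        xor_even_one (n + 2) (by omega)]
    · rw [hs, show fC n = n + 2 by simp [fC, h, show ¬ n % 8 ≤ 3 by omega],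
        show gC (n + 1) = n + 1 + 1 by simp [gC, show (n + 1) % 4 = 2 by omega],
        show fC (n + 1) = 0 by simp [fC, show (n + 1) % 8 = 6 by omega],
        show n + 1 + 1 = n + 2 by omega, Nat.xor_self]
    · rw [hs, show fC n = 0 by simp [fC, h],
        show gC (n + 1) = 0 by simp [gC, show (n + 1) % 4 = 3 by omega],
        show fC (n + 1) = 0 by simp [fC, show (n + 1) % 8 = 7 by omega], Nat.xor_zero]
    · rw [hs, show fC n = 0 by simp [fC, h],
        show gC (n + 1) = n + 1 by simp [gC, show (n + 1) % 4 = 0 by omega],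
        show fC (n + 1) = n + 1 by simp [fC, show (n + 1) % 8 = 0 by omega],
        Nat.zero_xor]
-- the loop of port A computes (aN, gN)
lemma loop_eq (l : Int) (n : Nat) :
    (PySem.List.pyRange 1 ((n : Int) + 1) 1).foldl
      (fun (st : Int × Int) i =>
        let B := PySem.Int.bxor st.2 i
        (if i ≥ l then PySem.Int.bxor st.1 B else st.1, B)) (0, 0)
      = (((aN l n : Nat) : Int), ((gN n : Nat) : Int)) := by
  induction n with
  | zero =>
    rw [PySem.List.pyRange_one_eq_nil (by omega)]
    simp [aN, gN]
  | succ n ih =>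
    rw [show ((n + 1 : Nat) : Int) + 1 = ((n : Int) + 1) + 1 by push_cast; ring,
      PySem.List.pyRange_one_succ_right (by omega), List.foldl_append, ih]
    simp only [List.foldl_cons, List.foldl_nil]
    have hB : PySem.Int.bxor ((gN n : Nat) : Int) ((n : Int) + 1)
        = ((gN (n + 1) : Nat) : Int) := by
      rw [show ((n : Int) + 1) = ((n + 1 : Nat) : Int) by push_cast; ring,
        PySem.Int.bxor_natCast]
      rfl
    by_cases hl : ((n : Int) + 1) ≥ l
    · simp only [hB, if_pos hl]
      rw [PySem.Int.bxor_natCast]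
      have : aN l (n + 1) = aN l n ^^^ gN (n + 1) := by simp [aN, if_pos hl]
      rw [this]
    · simp only [hB, if_neg hl]
      have : aN l (n + 1) = aN l n := by simp [aN, if_neg hl]
      rw [this]

lemma aN_of_le (l : Int) (hl : l ≤ 1) (n : Nat) : aN l n = fN n := by
  induction n with
  | zero => rfl
  | succ n ih => simp [aN, fN, ih, if_pos (show ((n : Int) + 1) ≥ l by omega)]

lemma aN_zero_of_lt (l : Int) (n : Nat) (h : (n : Int) < l) : aN l n = 0 := by
  induction n with
  | zero => rfl
  | succ n ih =>
    have h' : (n : Int) < l := by push_cast at h ⊢; omega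
    simp [aN, if_neg (show ¬ (((n : Int) + 1) ≥ l) by push_cast at h; omega), ih h']

lemma aN_of_ge (l : Int) (hl : 1 ≤ l) (n : Nat) (h : ((l - 1).toNat) ≤ n) :
    aN l n = fN n ^^^ fN ((l - 1).toNat) := by
  induction n with
  | zero =>
    have : (l - 1).toNat = 0 := by omega
    simp [aN, fN, this]
  | succ n ih =>
    by_cases hle : (l - 1).toNat ≤ n
    · have hcond : ((n : Int) + 1) ≥ l := by omega
      rw [show aN l (n+1) = aN l n ^^^ gN (n+1) by simp [aN, if_pos hcond], ih hle,
        show fN (n+1) = fN n ^^^ gN (n+1) from rfl]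
      rw [Nat.xor_assoc, Nat.xor_comm (fN ((l-1).toNat)) (gN (n+1)), ← Nat.xor_assoc]
    · have heq : (l - 1).toNat = n + 1 := by omega
      have hcond : ¬ (((n : Int) + 1) ≥ l) := by omega
      rw [show aN l (n+1) = aN l n by simp [aN, if_neg hcond],
        aN_zero_of_lt l n (by omega), heq, Nat.xor_self]

lemma pvF_natCast (n : Nat) : pvF ((n : Nat) : Int) = ((fC n : Nat) : Int) := by
  unfold pvF fC
  rw [show (8 : Int) = ((8 : Nat) : Int) from rfl, PySem.Int.mod_natCast]
  by_cases h1 : n % 8 ≤ 1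
  · simp [if_pos h1, show ((n : Int) % 8 : Int) ≤ 1 from by exact_mod_cast h1]
  all_goals
    by_cases h3 : n % 8 ≤ 3 <;> by_cases h5 : n % 8 ≤ 5 <;>
      simp_all <;> push_cast <;> omega

-- ===== VERDICT (by name: the statement is the Claim_ definition above) =====
theorem xorSequence_spec : Claim_equal_xorSequence := by
  intro l r _
  unfold Spec_xorSequence xorSequence xorSequence_alt
  by_cases hr : r ≤ 0
  · rw [PySem.List.pyRange_one_eq_nil (by omega)]
    simp only [List.foldl_nil]
    by_cases hl : l > 1
    · rw [if_pos hl, if_pos (show r < l by omega)]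
    · rw [if_neg hl, if_pos (show r < 1 by omega)]
  · push_neg at hr
    obtain ⟨n, rfl⟩ : ∃ n : Nat, r = (n : Int) := ⟨r.toNat, by omega⟩
    rw [loop_eq]
    by_cases hl : l > 1
    · rw [if_pos hl]
      by_cases hrl : (n : Int) < l
      · rw [if_pos hrl, aN_zero_of_lt l n hrl]; rfl
      · rw [if_neg hrl,
          show (l - 1 : Int) = (((l - 1).toNat : Nat) : Int) by omega,
          pvF_natCast n, pvF_natCast, PySem.Int.bxor_natCast,
          aN_of_ge l (by omega) n (by omega), fN_eq, fN_eq]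
    · rw [if_neg hl, if_neg (show ¬ ((n : Int) < 1) by omega),
        show (1 : Int) - 1 = ((0 : Nat) : Int) from rfl,
        pvF_natCast n, pvF_natCast 0, PySem.Int.bxor_natCast,
        aN_of_le l (by omega) n, fN_eq]
      simp [fC]
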